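-- pv_equiv track=rewrite | github.com/psf/pyperf | perf/_utils.py | format_cpu_infos
-- ===== SOURCE A (Python) =====
-- import collections
--
-- def format_cpu_list(cpus):
--     cpus = sorted(cpus)
--     parts = []
--     first = None
--     last = None
--     for cpu in cpus:
--         if first is None:
--             first = cpu
--         elif cpu != last + 1:
--             if first != last:
--                 parts.append('%s-%s' % (first, last))
--             else:
--                 parts.append(str(last))
--             first = cpu
--         last = cpu
--     if first != last:
--         parts.append('%s-%s' % (first, last))
--     else:
--         parts.append(str(last))
--     return ','.join(parts)
--
-- def format_cpu_infos(infos):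
--     groups = collections.defaultdict(list)
--     for cpu, info in infos.items():
--         groups[info].append(cpu)
--
--     items = [(cpus, info) for info, cpus in groups.items()]
--     items.sort()
--     text = []
--     for cpus, info in items:
--         cpus = format_cpu_list(cpus)
--         text.append('%s=%s' % (cpus, info))
--     return text
-- ===== SOURCE B (Python) =====
-- def format_cpu_list(cpus):
--     s = set(cpus)
--     parts = []
--     for first in sorted(c for c in s if c - 1 not in s):
--         last = first
--         while last + 1 in s:
--             last += 1
--         parts.append(str(first) if first == last else '%s-%s' % (first, last))
--     return ','.join(parts)
--
--
-- def format_cpu_infos(infos):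
--     groups = {}
--     for cpu, info in infos.items():
--         groups.setdefault(info, []).append(cpu)
--     return ['%s=%s' % (format_cpu_list(cpus), info)
--             for cpus, info in sorted((cpus, info) for info, cpus in groups.items())]
-- ===== Notes on version B (the rewrite author's own statement) =====
-- stated objective: alternative
-- what changed: format_cpu_list no longer scans the sorted list tracking first/last run state: B builds a hash set, finds each run's start as a cpu whose predecessor is not in the set, and walks each run forward by set membership (last+1 in s); the outer function uses a plain dict with setdefault and a comprehension instead of defaultdict plus accumulator loops.
import Mathlib
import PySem

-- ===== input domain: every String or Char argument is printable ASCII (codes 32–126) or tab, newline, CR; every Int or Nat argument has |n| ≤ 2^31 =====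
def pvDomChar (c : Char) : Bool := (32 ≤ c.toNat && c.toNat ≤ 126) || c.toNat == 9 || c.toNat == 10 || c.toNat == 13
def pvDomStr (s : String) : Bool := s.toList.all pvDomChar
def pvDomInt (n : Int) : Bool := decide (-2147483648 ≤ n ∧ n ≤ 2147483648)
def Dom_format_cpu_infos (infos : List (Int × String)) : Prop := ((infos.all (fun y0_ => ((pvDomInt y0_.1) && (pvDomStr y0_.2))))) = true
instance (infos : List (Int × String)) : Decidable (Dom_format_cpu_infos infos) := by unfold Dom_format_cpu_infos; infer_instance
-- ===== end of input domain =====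

-- B replaces A's sorted-scan with first/last run-tracking state by a set-based algorithm:
-- run starts are the cpus c with c-1 not in the set, and each run is walked forward by
-- membership tests (while last+1 in s); the outer grouping uses a plain dict + comprehension.

-- ===== PORT A =====
-- str(x) where x is an int or (only on an empty cpu list, never reached from format_cpu_infos) None
def pvOptStr : Option Int → String
  | none => "None"
  | some n => PySem.Int.toStr n

-- A's emit code (it appears twice verbatim in A): append '%s-%s' % (first, last) if they differ else str(last)
def pvEmitA (first last : Option Int) (parts : List String) : List String :=
  if first ≠ last then parts ++ [pvOptStr first ++ "-" ++ pvOptStr last]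
  else parts ++ [pvOptStr last]

-- loop body of A's format_cpu_list; state = (parts, first, last).  In Python, whenever first is not
-- None so is last, hence 'last.getD 0' (hand port of 'last + 1', exact on all reachable states).
def pvStepA (st : List String × Option Int × Option Int) (cpu : Int) : List String × Option Int × Option Int :=
  match st with
  | (parts, none, _last) => (parts, some cpu, some cpu)
  | (parts, some f, last) =>
      if cpu ≠ last.getD 0 + 1 then (pvEmitA (some f) last parts, some cpu, some cpu)
      else (parts, some f, some cpu)

def format_cpu_list (cpus : List Int) : String :=
  let cpus := PySem.List.sorted cpus (fun x => x) false
  let st := cpus.foldl pvStepA ([], none, none)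
  PySem.Str.join "," (pvEmitA st.2.1 st.2.2 st.1)

def format_cpu_infos (infos : List (Int × String)) : List String :=
  let entries := (PySem.Dict.ofList infos).items   -- infos.items(): the dict's pairs, insertion order
  let groups := entries.foldl (fun g p => g.modify p.2 [] (fun cpus => cpus ++ [p.1]))
      (PySem.Dict.empty : PySem.Dict String (List Int))   -- defaultdict(list); groups[info].append(cpu)
  let items := PySem.List.sorted2 (groups.items.map (fun p => (p.2, p.1))) (fun p => p.1) (fun p => p.2) false
  items.foldl (fun text p => text ++ [format_cpu_list p.1 ++ "=" ++ p.2]) []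

-- ===== PORT B =====
-- 'last = first; while last + 1 in s: last += 1' — hand port of the while loop, exact given enough
-- fuel (the walk visits distinct elements of s, so fuel = len(s) never runs out)
def pvWalk (s : List Int) (last : Int) : Nat → Int
  | 0 => last
  | fuel + 1 => if PySem.Set.contains s (last + 1) then pvWalk s (last + 1) fuel else last

def format_cpu_list_alt (cpus : List Int) : String :=
  let s := PySem.Set.ofList cpus                                     -- s = set(cpus)
  let starts := PySem.List.sorted (s.filter (fun c => !(PySem.Set.contains s (c - 1)))) (fun x => x) false
  let parts := starts.foldl (fun parts first =>
      let last := pvWalk s first s.length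
      parts ++ [if first = last then PySem.Int.toStr first
                else PySem.Int.toStr first ++ "-" ++ PySem.Int.toStr last]) []
  PySem.Str.join "," parts

def format_cpu_infos_alt (infos : List (Int × String)) : List String :=
  let groups := ((PySem.Dict.ofList infos).items).foldl
      (fun g p => g.modify p.2 [] (fun cpus => cpus ++ [p.1]))
      (PySem.Dict.empty : PySem.Dict String (List Int))   -- groups.setdefault(info, []).append(cpu)
  (PySem.List.sorted2 (groups.items.map (fun p => (p.2, p.1))) (fun p => p.1) (fun p => p.2) false).map
      (fun p => format_cpu_list_alt p.1 ++ "=" ++ p.2)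

-- ===== PRECONDITION & SPEC =====
def Spec_format_cpu_infos (infos : List (Int × String)) (out : List String) : Prop := out = format_cpu_infos_alt infos
instance (infos : List (Int × String)) (out : List String) : Decidable (Spec_format_cpu_infos infos out) := by unfold Spec_format_cpu_infos; infer_instance

-- ===== CLAIM (what is proved, stated in full; the proofs are below) =====
def Claim_equal_format_cpu_infos : Prop := ∀ (infos : List (Int × String)), Dom_format_cpu_infos infos → Spec_format_cpu_infos infos (format_cpu_infos infos)

-- ===== LEMMAS AND PROOFS =====

-- the string A emits for a finished run first..last
def pvEmitI (f l : Int) : String :=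
  if f ≠ l then PySem.Int.toStr f ++ "-" ++ PySem.Int.toStr l else PySem.Int.toStr l

-- run decomposition shared by both proofs: parts A emits from state (first = f, last = l)
def pvAGo (f l : Int) : List Int → List String
  | [] => [pvEmitI f l]
  | c :: rest => if c = l + 1 then pvAGo f c rest else pvEmitI f l :: pvAGo c c rest

def pvATop : List Int → List String
  | [] => []
  | c :: rest => pvAGo c c rest

-- the maximal chain l+1, l+2, … at the front of a list, and the remainder
def pvChain (l : Int) : List Int → List Int × List Int
  | [] => ([], [])
  | c :: rest =>
      if c = l + 1 then (c :: (pvChain c rest).1, (pvChain c rest).2)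
      else ([], c :: rest)

-- last element of (l :: r)
def pvLastD (l : Int) : List Int → Int
  | [] => l
  | c :: rest => pvLastD c rest

-- B's per-start loop body, as a function
def pvPartB (s : List Int) (fuel : Nat) (first : Int) : String :=
  let last := pvWalk s first fuel
  if first = last then PySem.Int.toStr first
  else PySem.Int.toStr first ++ "-" ++ PySem.Int.toStr last

theorem pvEmitA_some (f l : Int) (parts : List String) :
    pvEmitA (some f) (some l) parts = parts ++ [pvEmitI f l] := by
  by_cases h : f = l <;> simp [pvEmitA, pvEmitI, pvOptStr, h]

theorem pvA_fold (rest : List Int) : ∀ (parts : List String) (f l : Int),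
    pvEmitA (rest.foldl pvStepA (parts, some f, some l)).2.1
      (rest.foldl pvStepA (parts, some f, some l)).2.2
      (rest.foldl pvStepA (parts, some f, some l)).1
      = parts ++ pvAGo f l rest := by
  induction rest with
  | nil => intro parts f l; simp [pvAGo, pvEmitA_some]
  | cons c rest ih =>
      intro parts f l
      simp only [List.foldl_cons, pvStepA, Option.getD_some]
      by_cases h : c = l + 1
      · simp [h, pvAGo, ih]
      · simp [h, pvAGo, ih, pvEmitA_some, List.append_assoc]

theorem pvA_list (cpus : List Int) (x : Int) (xs : List Int)
    (h : PySem.List.sorted cpus (fun y => y) false = x :: xs) :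
    format_cpu_list cpus = PySem.Str.join "," (pvAGo x x xs) := by
  unfold format_cpu_list
  rw [h]
  simp only [List.foldl_cons, pvStepA]
  rw [pvA_fold]
  simp

theorem pvChain_append (rest : List Int) : ∀ (l : Int),
    (pvChain l rest).1 ++ (pvChain l rest).2 = rest := by
  induction rest with
  | nil => intro l; simp [pvChain]
  | cons c rest ih =>
      intro l
      simp only [pvChain]
      by_cases h : c = l + 1
      · subst h
        rw [if_pos rfl]
        simp [ih (l + 1)]
      · simp [h]

theorem pvChain_mem_bounds (rest : List Int) : ∀ (l : Int), ∀ x ∈ (pvChain l rest).1,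
    l < x ∧ x ≤ l + (pvChain l rest).1.length := by
  induction rest with
  | nil => intro l x hx; simp [pvChain] at hx
  | cons c rest ih =>
      intro l x hx
      simp only [pvChain] at hx ⊢
      by_cases h : c = l + 1
      · subst h
        rw [if_pos rfl] at hx ⊢
        simp only [List.length_cons]
        rcases List.mem_cons.mp hx with h | h
        · omega
        · have := ih (l + 1) x h
          omega
      · rw [if_neg h] at hx
        simp at hx

theorem pvChain_mem_of_le (rest : List Int) : ∀ (l : Int) (j : Nat), 1 ≤ j →
    j ≤ (pvChain l rest).1.length → l + (j : Int) ∈ (pvChain l rest).1 := by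
  induction rest with
  | nil => intro l j h1 h2; simp [pvChain] at h2; omega
  | cons c rest ih =>
      intro l j h1 h2
      simp only [pvChain] at h2 ⊢
      by_cases h : c = l + 1
      · subst h
        rw [if_pos rfl] at h2 ⊢
        simp only [List.length_cons] at h2
        by_cases hj : j = 1
        · subst hj
          simp
        · have hmem := ih (l + 1) (j - 1) (by omega) (by omega)
          have heq : l + 1 + ((j - 1 : Nat) : Int) = l + (j : Int) := by omega
          rw [heq] at hmem
          exact List.mem_cons_of_mem _ hmem
      · rw [if_neg h] at h2
        simp at h2
        omega

theorem pvLastD_chain (rest : List Int) : ∀ (l : Int),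
    pvLastD l (pvChain l rest).1 = l + (pvChain l rest).1.length := by
  induction rest with
  | nil => intro l; simp [pvChain, pvLastD]
  | cons c rest ih =>
      intro l
      simp only [pvChain]
      by_cases h : c = l + 1
      · rw [if_pos h]
        simp only [pvLastD, List.length_cons, ih c]
        omega
      · simp [h, pvLastD]

theorem pvChain_snd_head_ne (rest : List Int) : ∀ (l c : Int) (r' : List Int),
    (pvChain l rest).2 = c :: r' → c ≠ l + (pvChain l rest).1.length + 1 := by
  induction rest with
  | nil => intro l c r' h; simp [pvChain] at h
  | cons c0 rest ih =>
      intro l c r' h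
      simp only [pvChain] at h ⊢
      by_cases hc : c0 = l + 1
      · rw [if_pos hc] at h ⊢
        have := ih c0 c r' h
        simp only [List.length_cons]
        omega
      · rw [if_neg hc] at h ⊢
        simp only [List.length_nil] at *
        cases h
        omega

theorem pvAGo_chain (rest : List Int) : ∀ (f l : Int),
    pvAGo f l rest = pvEmitI f (pvLastD l (pvChain l rest).1) :: pvATop (pvChain l rest).2 := by
  induction rest with
  | nil => intro f l; simp [pvAGo, pvChain, pvLastD, pvATop]
  | cons c rest ih =>
      intro f l
      simp only [pvAGo, pvChain]
      by_cases h : c = l + 1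
      · rw [if_pos h, if_pos h, ih f c]
        simp [pvLastD]
      · rw [if_neg h, if_neg h]
        simp [pvLastD, pvATop]

theorem pvWalk_spec (fuel : Nat) : ∀ (s : List Int) (f : Int) (k : Nat), k ≤ fuel →
    (∀ j : Nat, 1 ≤ j → j ≤ k → f + (j : Int) ∈ s) → f + (k : Int) + 1 ∉ s →
    pvWalk s f fuel = f + (k : Int) := by
  induction fuel with
  | zero =>
      intro s f k hk _ _
      interval_cases k
      simp [pvWalk]
  | succ fuel ih =>
      intro s f k hk hmem hstop
      simp only [pvWalk]
      cases k with
      | zero =>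
          have hni : PySem.Set.contains s (f + 1) = false := by
            rw [← Bool.not_eq_true]
            intro h
            exact hstop (by simpa using (PySem.Set.contains_iff s (f + 1)).mp h)
          rw [hni]
          simp
      | succ k' =>
          have h1 : f + 1 ∈ s := by simpa using hmem 1 (by omega) (by omega)
          rw [if_pos ((PySem.Set.contains_iff s (f + 1)).mpr h1)]
          have hrec := ih s (f + 1) k' (by omega)
            (fun j hj1 hj2 => by
              have := hmem (j + 1) (by omega) (by omega)
              have heq : f + ((j + 1 : Nat) : Int) = f + 1 + (j : Int) := by push_cast; ring
              rwa [heq] at this)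
            (by
              intro h; apply hstop
              have heq : f + 1 + (k' : Int) + 1 = f + ((k' + 1 : Nat) : Int) + 1 := by push_cast; ring
              rwa [heq] at h)
          rw [hrec]
          push_cast
          ring

-- core equivalence: on a strictly increasing list cs whose members above a lower bound lo
-- (which separates cs from everything smaller) are exactly the members of s, B's
-- start-filter + walk produces exactly A's run decomposition
theorem pvBmap (n : Nat) : ∀ (cs s : List Int) (fuel : Nat) (lo : Int),
    cs.length ≤ n → cs.length ≤ fuel → cs.Pairwise (· < ·) →
    (∀ x ∈ cs, lo + 1 < x) →
    (∀ x : Int, lo < x → (x ∈ s ↔ x ∈ cs)) →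
    (cs.filter (fun c => !(PySem.Set.contains s (c - 1)))).map (pvPartB s fuel) = pvATop cs := by
  induction n with
  | zero =>
      intro cs s fuel lo hn _ _ _ _
      have : cs = [] := List.eq_nil_of_length_eq_zero (Nat.le_zero.mp hn)
      subst this
      simp [pvATop]
  | succ n ih =>
      intro cs s fuel lo hn hfuel hpw hlo hmem
      match cs, hpw, hn, hfuel, hlo, hmem with
      | [], _, _, _, _, _ => simp [pvATop]
      | f :: rest, hpw, hn, hfuel, hlo, hmem =>
          obtain ⟨hflt, hpw'⟩ := List.pairwise_cons.mp hpw
          have hsplit : (pvChain f rest).1 ++ (pvChain f rest).2 = rest := pvChain_append rest f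
          set ch := (pvChain f rest).1 with hchdef
          set r2 := (pvChain f rest).2 with hr2def
          set k : Nat := ch.length with hkdef
          have hrestmem : ∀ x : Int, x ∈ rest ↔ x ∈ ch ∨ x ∈ r2 := by
            intro x; rw [← hsplit]; simp
          have hpwsplit := List.pairwise_append.mp (by rw [hsplit]; exact hpw')
          obtain ⟨hpwch, hpwr2, hcross⟩ := hpwsplit
          -- chain membership description
          have hchbounds : ∀ x ∈ ch, f < x ∧ x ≤ f + (k : Int) := by
            have h := pvChain_mem_bounds rest f
            rw [← hchdef, ← hkdef] at h
            exact h
          have hchof : ∀ j : Nat, 1 ≤ j → j ≤ k → f + (j : Int) ∈ ch := by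
            have h := pvChain_mem_of_le rest f
            rw [← hchdef, ← hkdef] at h
            exact h
          have hgtk : ∀ x ∈ r2, f + (k : Int) < x := by
            intro x hx
            by_cases hk0 : k = 0
            · have hchnil : ch = [] := List.eq_nil_of_length_eq_zero hk0
              have hxrest : x ∈ rest := (hrestmem x).mpr (Or.inr hx)
              have := hflt x hxrest
              simp only [hk0, Nat.cast_zero, add_zero]
              omega
            · exact hcross _ (hchof k (by omega) le_rfl) _ hx
          have hr2gt : ∀ x ∈ r2, f + (k : Int) + 1 < x := by
            cases hr2c : r2 with
            | nil => intro x hx; simp at hx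
            | cons c r' =>
                have hcne : c ≠ f + (k : Int) + 1 := by
                  have := pvChain_snd_head_ne rest f c r' (by rw [← hr2def, hr2c])
                  rwa [← hchdef, ← hkdef] at this
                have hc : f + (k : Int) < c := hgtk c (by rw [hr2c]; exact List.mem_cons_self ..)
                intro x hx
                rcases List.mem_cons.mp hx with h | h
                · subst h; omega
                · have hpr2 : (c :: r').Pairwise (· < ·) := by rw [← hr2c]; exact hpwr2
                  have := (List.pairwise_cons.mp hpr2).1 x h
                  omega
          have hcsnotmem : f + (k : Int) + 1 ∉ f :: rest := by
            intro h
            rcases List.mem_cons.mp h with h | h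
            · omega
            · rcases (hrestmem _).mp h with h | h
              · have := hchbounds _ h; omega
              · have := hr2gt _ h; omega
          have hlof : lo + 1 < f := hlo f (List.mem_cons_self ..)
          -- the filter keeps f and drops the whole chain
          have hkeepf : (!(PySem.Set.contains s (f - 1))) = true := by
            simp only [Bool.not_eq_true']
            rw [← Bool.not_eq_true]
            intro hc
            have hin := (PySem.Set.contains_iff s (f - 1)).mp hc
            have := (hmem (f - 1) (by omega)).mp hin
            rcases List.mem_cons.mp this with h | h
            · omega
            · have := hflt _ h; omega
          have hdropch : ∀ c ∈ ch, (!(PySem.Set.contains s (c - 1))) = false := by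
            intro c hc
            have hb := hchbounds c hc
            have hmemcs : c - 1 ∈ f :: rest := by
              by_cases hcf : c - 1 = f
              · rw [hcf]; exact List.mem_cons_self ..
              · have h1 : 1 ≤ (c - 1 - f).toNat := by omega
                have h2 : (c - 1 - f).toNat ≤ k := by omega
                have h := hchof _ h1 h2
                have heq : f + (((c - 1 - f).toNat : Nat) : Int) = c - 1 := by omega
                rw [heq] at h
                exact List.mem_cons_of_mem _ ((hrestmem _).mpr (Or.inl h))
            have hins : c - 1 ∈ s := (hmem (c - 1) (by omega)).mpr hmemcs
            simp
            exact hins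
          have hfilter : (f :: rest).filter (fun c => !(PySem.Set.contains s (c - 1)))
              = f :: r2.filter (fun c => !(PySem.Set.contains s (c - 1))) := by
            rw [← hsplit, List.filter_cons, if_pos hkeepf, List.filter_append,
              List.filter_eq_nil_iff.mpr (fun c hc => by rw [hdropch c hc]; simp)]
            simp
          -- the walk from f ends at f + k
          have hklen : k ≤ rest.length := by
            rw [← hsplit, List.length_append]; omega
          have hwalk : pvWalk s f fuel = f + (k : Int) := by
            apply pvWalk_spec fuel s f k
            · simp only [List.length_cons] at hfuel; omega
            · intro j hj1 hj2
              have h := hchof j hj1 hj2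
              exact (hmem _ (by omega)).mpr (List.mem_cons_of_mem _ ((hrestmem _).mpr (Or.inl h)))
            · intro hin
              exact hcsnotmem ((hmem _ (by omega)).mp hin)
          have hhead : pvPartB s fuel f = pvEmitI f (f + (k : Int)) := by
            simp only [pvPartB, pvEmitI, hwalk]
            rcases eq_or_ne f (f + (k : Int)) with h | h
            · rw [if_pos h, if_neg (not_not_intro h), ← h]
            · rw [if_neg h, if_pos h]
          -- recursive call on r2
          have htail : (r2.filter (fun c => !(PySem.Set.contains s (c - 1)))).map (pvPartB s fuel)
              = pvATop r2 := by
            apply ih r2 s fuel (f + (k : Int))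
            · simp only [List.length_cons] at hn
              have : r2.length ≤ rest.length := by rw [← hsplit, List.length_append]; omega
              omega
            · simp only [List.length_cons] at hfuel
              have : r2.length ≤ rest.length := by rw [← hsplit, List.length_append]; omega
              omega
            · exact hpwr2
            · exact hr2gt
            · intro x hxgt
              constructor
              · intro hin
                have := (hmem x (by omega)).mp hin
                rcases List.mem_cons.mp this with h | h
                · omega
                · rcases (hrestmem _).mp h with h | h
                  · have := hchbounds _ h; omega
                  · exact h
              · intro hin
                exact (hmem x (by omega)).mpr
                  (List.mem_cons_of_mem _ ((hrestmem _).mpr (Or.inr hin)))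
          rw [hfilter, List.map_cons, hhead, htail]
          have hrhs : pvATop (f :: rest) = pvAGo f f rest := rfl
          rw [hrhs, pvAGo_chain rest f f, pvLastD_chain rest f, ← hchdef, ← hr2def, ← hkdef]

-- strict increase of the sorted list of a Nodup list
theorem pvSorted_lt (cpus : List Int) (hnd : cpus.Nodup) :
    (PySem.List.sorted cpus (fun y => y) false).Pairwise (· < ·) := by
  have hle : (PySem.List.sorted cpus (fun y => y) false).Pairwise (fun a b => a ≤ b) :=
    PySem.List.sorted_pairwise cpus (fun y => y) 
  have hne : (PySem.List.sorted cpus (fun y => y) false).Nodup :=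
    ((PySem.List.sorted_perm cpus (fun y => y) false).nodup_iff).mpr hnd
  exact (hle.and hne).imp (fun h => lt_of_le_of_ne h.1 h.2)

theorem pvList_eq (cpus : List Int) (hne : cpus ≠ []) (hnd : cpus.Nodup) :
    format_cpu_list cpus = format_cpu_list_alt cpus := by
  have hperm := PySem.List.sorted_perm cpus (fun y => y) false
  have hpwlt := pvSorted_lt cpus hnd
  have halt : format_cpu_list_alt cpus = PySem.Str.join ","
      ((PySem.List.sorted
          ((PySem.Set.ofList cpus).filter (fun c => !(PySem.Set.contains (PySem.Set.ofList cpus) (c - 1))))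
          (fun x => x) false).foldl
        (fun parts first => parts ++ [pvPartB (PySem.Set.ofList cpus) (PySem.Set.ofList cpus).length first]) []) := rfl
  cases hcs : PySem.List.sorted cpus (fun y => y) false with
  | nil =>
      have := hperm
      rw [hcs] at this
      exact absurd (this.symm.eq_nil) hne
  | cons x xs =>
      rw [pvA_list cpus x xs hcs, halt, PySem.Set.ofList_eq_self_of_nodup cpus hnd,
        PySem.List.foldl_append_singleton_eq_map]
      have hstarts : PySem.List.sorted (cpus.filter (fun c => !(PySem.Set.contains cpus (c - 1))))
            (fun y => y) false
          = (PySem.List.sorted cpus (fun y => y) false).filter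
              (fun c => !(PySem.Set.contains cpus (c - 1))) := by
        apply PySem.List.sorted_eq_of_perm_of_pairwise_lt
        · exact hperm.filter _
        · exact hpwlt.filter _
      rw [hstarts, hcs]
      have hb := pvBmap (x :: xs).length (x :: xs) cpus cpus.length (x - 2)
        le_rfl
        (by rw [← hperm.length_eq, hcs])
        (by rw [← hcs]; exact hpwlt)
        (by
          intro y hy
          rcases List.mem_cons.mp hy with h | h
          · omega
          · have := (List.pairwise_cons.mp (hcs ▸ hpwlt)).1 y h
            omega)
        (by
          intro y _
          rw [← hcs]
          exact (PySem.List.mem_sorted cpus (fun y => y) false y).symm)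
      rw [hb]
      rfl

-- the cpu lists collected per info are nonempty and duplicate-free (cpus are dict keys)
theorem pvGroups_values_ok (entries : List (Int × String))
    (hfst : (entries.map (fun p => p.1)).Nodup) :
    ∀ v ∈ (entries.foldl (fun g p => g.modify p.2 [] (fun cpus => cpus ++ [p.1]))
        (PySem.Dict.empty : PySem.Dict String (List Int))).values, v ≠ [] ∧ v.Nodup := by
  intro v hv
  set d := entries.foldl (fun g p => g.modify p.2 [] (fun cpus => cpus ++ [p.1]))
      (PySem.Dict.empty : PySem.Dict String (List Int)) with hd
  have hnd : d.keys.Nodup := by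
    rw [hd]
    exact PySem.Dict.nodup_keys_foldl_modify_key entries (fun p => p.2) [] (fun g p cpus => cpus ++ [p.1]) _
      (by simp [PySem.Dict.keys_empty])
  rw [PySem.Dict.values_eq_map_keys d hnd []] at hv
  obtain ⟨k, hk, hkv⟩ := List.mem_map.mp hv
  -- k is the info of some entry
  have hkeys : d.keys = PySem.Set.update (PySem.Dict.empty : PySem.Dict String (List Int)).keys (entries.map (fun p => p.2)) := by
    rw [hd]
    exact PySem.Dict.keys_foldl_modify_key entries (fun p => p.2) [] (fun g p cpus => cpus ++ [p.1]) _
  rw [hkeys] at hk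
  have hk' : k ∈ entries.map (fun p => p.2) := by
    rcases (PySem.Set.mem_update _ _ _).mp hk with h | h
    · simp [PySem.Dict.keys_empty] at h
    · exact h
  obtain ⟨p, hp, hpk⟩ := List.mem_map.mp hk'
  -- compute the value at k
  have hfold : d = (entries.map (fun p => (p.2, p.1))).foldl
      (fun g q => g.modify q.1 [] (fun cpus => cpus ++ [q.2])) PySem.Dict.empty := by
    rw [hd, List.foldl_map]
  have hval : d.getD k [] = ((entries.map (fun p => (p.2, p.1))).filter (fun q => q.1 == k)).map (fun q => q.2) := by
    rw [hfold, PySem.Dict.getD_foldl_modify_append]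
    simp [PySem.Dict.getD_empty]
  rw [← hkv] at *
  constructor
  · intro hnil
    rw [hval] at hnil
    have : (p.2, p.1) ∈ (entries.map (fun p => (p.2, p.1))).filter (fun q => q.1 == k) := by
      rw [List.mem_filter]
      exact ⟨List.mem_map.mpr ⟨p, hp, rfl⟩, by simp [hpk]⟩
    rw [List.map_eq_nil_iff.mp hnil] at this
    simp at this
  · rw [hval, List.filter_map, List.map_map]
    have : ((fun q : String × Int => q.2) ∘ (fun p : Int × String => (p.2, p.1))) = (fun p : Int × String => p.1) := rfl
    rw [this]
    exact List.Nodup.sublist (List.Sublist.map _ List.filter_sublist) hfst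

-- ===== VERDICT (by name: the statement is the Claim_ definition above) =====
theorem format_cpu_infos_spec : Claim_equal_format_cpu_infos := by
  intro infos _
  unfold Spec_format_cpu_infos format_cpu_infos format_cpu_infos_alt
  rw [PySem.List.foldl_append_singleton_eq_map]
  apply List.map_congr_left
  intro p hp
  have hmem : p ∈ ((((PySem.Dict.ofList infos).items).foldl
      (fun g q => g.modify q.2 [] (fun cpus => cpus ++ [q.1]))
      (PySem.Dict.empty : PySem.Dict String (List Int))).items).map (fun q => (q.2, q.1)) :=
    (PySem.List.sorted2_perm _ _ _ _).mem_iff.mp hp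
  obtain ⟨q, hq, hqp⟩ := List.mem_map.mp hmem
  have hval : p.1 ∈ (((PySem.Dict.ofList infos).items).foldl
      (fun g q => g.modify q.2 [] (fun cpus => cpus ++ [q.1]))
      (PySem.Dict.empty : PySem.Dict String (List Int))).values := by
    rw [← hqp]
    exact List.mem_map.mpr ⟨q, hq, rfl⟩
  have hfst : (((PySem.Dict.ofList infos).items).map (fun p => p.1)).Nodup :=
    PySem.Dict.nodup_keys_ofList infos
  obtain ⟨hvne, hvnd⟩ := pvGroups_values_ok _ hfst _ hval
  rw [pvList_eq p.1 hvne hvnd]
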